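-- pv_equiv track=rewrite | github.com/AlexWUrobot/leetcode_python | Get Maximum Events.py | getMaximumEvents
-- ===== SOURCE A (Python) =====
-- from typing import List
-- from collections import Counter
--
-- def getMaximumEvents(payload: List[int]) -> int:
--     freq=Counter(payload)
--     minV=min(payload)
--     maxV=max(payload)
--     n=len(freq)
--     total=0
--     for key, v in freq.items():
--         if key==minV or key==maxV:
--             total+=min(2, v)
--         else:
--             total+=min(3, v)
--     return total
-- ===== SOURCE B (Python) =====
-- from typing import List
--
-- def getMaximumEvents(payload: List[int]) -> int:
--     s = sorted(payload)
--     minV, maxV = s[0], s[-1]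
--     total = 0
--     i = 0
--     n = len(s)
--     while i < n:
--         j = i
--         while j < n and s[j] == s[i]:
--             j += 1
--         cnt = j - i
--         total += min(2, cnt) if s[i] == minV or s[i] == maxV else min(3, cnt)
--         i = j
--     return total
-- ===== Notes on version B (the rewrite author's own statement) =====
-- stated objective: alternative
-- what changed: Replaces the Counter hash table and per-key dict iteration by sorting the list once and scanning it in a single run-length pass, computing min and max from the ends of the sorted list.
import Mathlib
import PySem

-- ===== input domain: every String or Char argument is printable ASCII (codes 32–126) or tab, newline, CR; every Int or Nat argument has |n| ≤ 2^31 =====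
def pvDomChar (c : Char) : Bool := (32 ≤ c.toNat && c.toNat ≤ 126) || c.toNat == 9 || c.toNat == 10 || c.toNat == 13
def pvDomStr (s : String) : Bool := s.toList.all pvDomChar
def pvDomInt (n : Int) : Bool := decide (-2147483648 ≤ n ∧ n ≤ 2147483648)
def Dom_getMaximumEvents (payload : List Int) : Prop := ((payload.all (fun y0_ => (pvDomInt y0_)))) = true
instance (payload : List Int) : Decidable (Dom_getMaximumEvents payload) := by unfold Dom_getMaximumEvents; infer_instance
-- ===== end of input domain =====

-- B replaces A's Counter hash table and dict iteration by one run-length scan over the sorted list; objective: alternative.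

-- ===== PORT A =====
-- A: freq = Counter(payload); minV = min(payload); maxV = max(payload); fold over freq.items adding capped counts.
def getMaximumEvents (payload : List Int) : Int :=
  let freq := PySem.Dict.counter payload
  match PySem.List.min? payload (fun x => x), PySem.List.max? payload (fun x => x) with
  | some minV, some maxV =>
      let _n : Int := freq.size   -- n = len(freq), unused by A
      freq.items.foldl (fun total kv =>
        if kv.1 == minV || kv.1 == maxV then total + min 2 kv.2 else total + min 3 kv.2) 0
  | _, _ => 0    -- unreachable under Pre_ (Python raises ValueError on [])

-- ===== PORT B =====
-- B helper: the while loop of Source B over the sorted list, consuming one run of equal values per step.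
def pvRunScan (minV maxV : Int) (l : List Int) : Int :=
  match l with
  | [] => 0
  | x :: rest =>
      let cnt : Int := 1 + (rest.takeWhile (fun y => y == x)).length
      (if x == minV || x == maxV then min 2 cnt else min 3 cnt) +
        pvRunScan minV maxV (rest.dropWhile (fun y => y == x))
  termination_by l.length
  decreasing_by
    simp only [List.length_cons]
    exact Nat.lt_succ_of_le (List.length_dropWhile_le _ _)

def getMaximumEvents_alt (payload : List Int) : Int :=
  let s := PySem.List.sorted payload (fun x => x) false
  match s with
  | [] => 0    -- unreachable under Pre_ (Python raises IndexError on [])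
  | x :: rest => pvRunScan x ((x :: rest).getLast (List.cons_ne_nil x rest)) (x :: rest)

-- ===== PRECONDITION & SPEC =====
-- Pre_ excludes exactly the empty list, on which A raises ValueError (min() of an empty sequence).
def Pre_getMaximumEvents (payload : List Int) : Prop := payload ≠ []
instance (payload : List Int) : Decidable (Pre_getMaximumEvents payload) := by unfold Pre_getMaximumEvents; infer_instance
def pvWitness_getMaximumEvents : List Int := [3, 1, 1, 2, 2, 2, 2]

def Spec_getMaximumEvents (payload : List Int) (out : Int) : Prop := out = getMaximumEvents_alt payload
instance (payload : List Int) (out : Int) : Decidable (Spec_getMaximumEvents payload out) := by unfold Spec_getMaximumEvents; infer_instance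

-- ===== CLAIM (what is proved, stated in full; the proofs are below) =====
def Claim_equal_getMaximumEvents : Prop := ∀ (payload : List Int), Dom_getMaximumEvents payload → Pre_getMaximumEvents payload → Spec_getMaximumEvents payload (getMaximumEvents payload)

-- ===== LEMMAS AND PROOFS =====

-- the capped contribution of value k occurring with multiplicity c
def pvCap (minV maxV k c : Int) : Int :=
  if k == minV || k == maxV then min 2 c else min 3 c

-- A's fold over the counter items is the Finset sum of capped multiplicities.
theorem pvA_eq_sum (payload : List Int) (minV maxV : Int) :
    (PySem.Dict.counter payload).items.foldl (fun total kv =>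
        if kv.1 == minV || kv.1 == maxV then total + min 2 kv.2 else total + min 3 kv.2) 0
      = ∑ k ∈ payload.toFinset, pvCap minV maxV k (payload.count k) := by
  rw [PySem.List.foldl_congr_mem _ _
        (fun (total : Int) (kv : Int × Int) => total + pvCap minV maxV kv.1 kv.2) 0
        (by intro acc kv _
            by_cases h : (kv.1 == minV || kv.1 == maxV) = true <;> simp [pvCap, h])]
  rw [PySem.List.foldl_add, PySem.Dict.items_counter, List.map_map, zero_add]
  have hfin : (PySem.Set.ofList payload).toFinset = payload.toFinset := by
    ext k
    simp [List.mem_toFinset, PySem.Set.mem_ofList]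
  rw [← List.sum_toFinset _ (PySem.Set.nodup_ofList payload), hfin]
  exact Finset.sum_congr rfl (fun k _ => rfl)

-- the last element of a ≤-sorted list bounds every element
theorem pvLe_getLast : ∀ (l : List Int) (h : l ≠ []), l.Pairwise (· ≤ ·) →
    ∀ y ∈ l, y ≤ l.getLast h := by
  intro l
  induction l with
  | nil => intro h; exact absurd rfl h
  | cons x rest ih =>
    intro _ hpw y hy
    cases rest with
    | nil => simp at hy; simp [hy]
    | cons z rest' =>
      rw [List.getLast_cons (List.cons_ne_nil z rest')]
      rcases List.mem_cons.mp hy with rfl | hy'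
      · exact List.rel_of_pairwise_cons hpw (List.getLast_mem _)
      · exact ih (List.cons_ne_nil z rest') hpw.tail y hy'

-- B's run scan over a ≤-sorted list is the same Finset sum.
theorem pvRunScan_eq_sum (minV maxV : Int) (s : List Int) (hs : s.Pairwise (· ≤ ·)) :
    pvRunScan minV maxV s = ∑ k ∈ s.toFinset, pvCap minV maxV k (s.count k) := by
  suffices H : ∀ n (s : List Int), s.length ≤ n → s.Pairwise (· ≤ ·) →
      pvRunScan minV maxV s = ∑ k ∈ s.toFinset, pvCap minV maxV k (s.count k) from
    H s.length s le_rfl hs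
  intro n
  induction n with
  | zero =>
    intro s hlen _
    have : s = [] := List.eq_nil_of_length_eq_zero (Nat.le_zero.mp hlen)
    subst this
    simp [pvRunScan]
  | succ n ih =>
    intro s hlen hpw
    cases s with
    | nil => simp [pvRunScan]
    | cons x rest =>
      obtain ⟨t, d, ht_def, hd_def⟩ :
          ∃ t d, t = rest.takeWhile (fun y => y == x) ∧ d = rest.dropWhile (fun y => y == x) :=
        ⟨_, _, rfl, rfl⟩
      have hrest : t ++ d = rest := by
        rw [ht_def, hd_def]; exact List.takeWhile_append_dropWhile
      have ht : ∀ y ∈ t, y = x := by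
        intro y hy
        rw [ht_def] at hy
        exact beq_iff_eq.mp (List.mem_takeWhile_imp (p := fun y => y == x) hy)
      have hdsub : d.Sublist rest := hd_def ▸ List.dropWhile_sublist _
      have hxle : ∀ y ∈ rest, x ≤ y := fun y hy => List.rel_of_pairwise_cons hpw hy
      have hdpw : d.Pairwise (· ≤ ·) := List.Pairwise.sublist hdsub hpw.tail
      have hdlt : ∀ z ∈ d, x < z := by
        cases hd : d with
        | nil => intro z hz; simp at hz
        | cons z0 d' =>
          have hdw : rest.dropWhile (fun y => y == x) = z0 :: d' := by rw [← hd_def]; exact hd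
          have hdne : rest.dropWhile (fun y => y == x) ≠ [] := by
            rw [hdw]; exact List.cons_ne_nil _ _
          have hz0f := List.head_dropWhile_not (fun y => y == x) hdne
          have hhead : (rest.dropWhile (fun y => y == x)).head hdne = z0 := by simp [hdw]
          rw [hhead] at hz0f
          have hz0x : z0 ≠ x := by simpa using hz0f
          have hz0mem : z0 ∈ rest := hdsub.mem (hd ▸ List.mem_cons_self)
          have hz0lt : x < z0 := lt_of_le_of_ne (hxle z0 hz0mem) (Ne.symm hz0x)
          intro z hz
          rcases List.mem_cons.mp hz with rfl | hz'
          · exact hz0lt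
          · exact lt_of_lt_of_le hz0lt (List.rel_of_pairwise_cons (hd ▸ hdpw) hz')
      have hxd : x ∉ d := fun h => lt_irrefl x (hdlt x h)
      have hdlen : d.length ≤ n := by
        have h1 : d.length ≤ rest.length := hd_def ▸ List.length_dropWhile_le _ _
        have h2 : (x :: rest).length ≤ n + 1 := hlen
        simp only [List.length_cons] at h2
        omega
      have hcx : (x :: rest).count x = t.length + 1 := by
        rw [List.count_cons_self, ← hrest, List.count_append]
        have h1 : t.count x = t.length := List.count_eq_length.mpr (fun b hb => (ht b hb).symm)
        have h2 : d.count x = 0 := List.count_eq_zero.mpr hxd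
        omega
      have hck : ∀ k ∈ d.toFinset, (x :: rest).count k = d.count k := by
        intro k hk
        have hkd : k ∈ d := List.mem_toFinset.mp hk
        have hkx : k ≠ x := fun h => lt_irrefl x (h ▸ hdlt k hkd)
        have h0 : (x :: rest).count k = rest.count k := by
          simp [Ne.symm hkx]
        rw [h0, ← hrest, List.count_append]
        have h1 : t.count k = 0 := List.count_eq_zero.mpr (fun h => hkx (ht k h))
        omega
      have hfin : (x :: rest).toFinset = insert x d.toFinset := by
        ext k
        simp only [List.mem_toFinset, Finset.mem_insert, List.mem_cons, ← hrest,
          List.mem_append]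
        constructor
        · rintro (h | h | h)
          · exact Or.inl h
          · exact Or.inl (ht _ h)
          · exact Or.inr h
        · rintro (h | h)
          · exact Or.inl h
          · exact Or.inr (Or.inr h)
      rw [pvRunScan]
      simp only [← ht_def, ← hd_def]
      rw [ih d hdlen hdpw, hfin,
        Finset.sum_insert (fun h => hxd (List.mem_toFinset.mp h))]
      congr 1
      · unfold pvCap
        have hc : ((x :: rest).count x : Int) = 1 + (t.length : Int) := by
          rw [hcx]; push_cast; ring
        rw [hc]
      · exact Finset.sum_congr rfl (fun k hk => by rw [hck k hk])

-- the head of the sorted list is min(payload)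
theorem pvHead_eq_min (payload : List Int) (x : Int) (rest : List Int)
    (hs : PySem.List.sorted payload (fun y => y) false = x :: rest) :
    PySem.List.min? payload (fun y => y) = some x := by
  have hperm := PySem.List.sorted_perm payload (fun y => y) false
  rw [hs] at hperm
  have hne : payload ≠ [] := by
    intro h; rw [h] at hperm; simpa using hperm.length_eq
  cases hmin : PySem.List.min? payload (fun y => y) with
  | none => exact absurd ((PySem.List.min?_eq_none_iff _ _).mp hmin) hne
  | some m =>
    have hm_mem : m ∈ payload := PySem.List.min?_mem hmin
    have hm_s : m ∈ x :: rest := hperm.mem_iff.mpr hm_mem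
    have hx_mem : x ∈ payload := hperm.mem_iff.mp List.mem_cons_self
    have hmx : m ≤ x := PySem.List.min?_isMin hmin x hx_mem
    have hpw := PySem.List.sorted_pairwise payload (fun y => y)
    rw [hs] at hpw
    have hxm : x ≤ m := by
      rcases List.mem_cons.mp hm_s with rfl | h
      · exact le_rfl
      · exact List.rel_of_pairwise_cons hpw h
    rw [le_antisymm hmx hxm]

-- the last of the sorted list is max(payload)
theorem pvLast_eq_max (payload : List Int) (x : Int) (rest : List Int)
    (hs : PySem.List.sorted payload (fun y => y) false = x :: rest) :
    PySem.List.max? payload (fun y => y) = some ((x :: rest).getLast (List.cons_ne_nil x rest)) := by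
  have hperm := PySem.List.sorted_perm payload (fun y => y) false
  rw [hs] at hperm
  have hne : payload ≠ [] := by
    intro h; rw [h] at hperm; simpa using hperm.length_eq
  cases hmax : PySem.List.max? payload (fun y => y) with
  | none => exact absurd ((PySem.List.max?_eq_none_iff _ _).mp hmax) hne
  | some m =>
    have hm_mem : m ∈ payload := PySem.List.max?_mem hmax
    have hm_s : m ∈ x :: rest := hperm.mem_iff.mpr hm_mem
    have hpw := PySem.List.sorted_pairwise payload (fun y => y)
    rw [hs] at hpw
    set g := (x :: rest).getLast (List.cons_ne_nil x rest) with hg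
    have hg_mem : g ∈ x :: rest := List.getLast_mem _
    have hg_pay : g ∈ payload := hperm.mem_iff.mp hg_mem
    have h1 : g ≤ m := PySem.List.max?_isMax hmax g hg_pay
    have h2 : m ≤ g := pvLe_getLast (x :: rest) (List.cons_ne_nil x rest) hpw m hm_s
    rw [le_antisymm h1 h2]

-- ===== VERDICT (by name: the statement is the Claim_ definition above) =====
theorem getMaximumEvents_spec : Claim_equal_getMaximumEvents := by
  intro payload _ hne
  unfold Spec_getMaximumEvents getMaximumEvents getMaximumEvents_alt
  cases hsort : PySem.List.sorted payload (fun x => x) false with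
  | nil => exact absurd ((PySem.List.sorted_eq_nil_iff _ _ _).mp hsort) hne
  | cons x rest =>
    rw [pvHead_eq_min payload x rest hsort, pvLast_eq_max payload x rest hsort]
    dsimp only
    have hpw := PySem.List.sorted_pairwise payload (fun y => y)
    rw [hsort] at hpw
    rw [pvA_eq_sum, pvRunScan_eq_sum _ _ _ hpw]
    have hperm := PySem.List.sorted_perm payload (fun y => y) false
    rw [hsort] at hperm
    rw [List.toFinset_eq_of_perm _ _ hperm.symm]
    exact Finset.sum_congr rfl (fun k _ => by rw [hperm.count_eq k])
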